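-- pv_equiv track=rewrite | github.com/Kawser-nerd/CLCDSA | Source Codes/AtCoder/abc099/C/4909972.py | f
-- ===== SOURCE A (Python) =====
-- memo = {i:i for i in range(6)}
--
-- def f(n):
--     tmp = memo.get(n,None)
--     if tmp != None:
--         return tmp
--     i,j = 0,0
--     a,b = n,n
--     while a >= 6:
--         i += 1
--         a //= 6
--     while b >= 9:
--         j += 1
--         b //= 9
--     ret = min(1+f(n-6**i),1+f(n-9**j))
--     memo[n] = ret
--     return ret
-- ===== SOURCE B (Python) =====
-- def _pow_below(m, b):
--     p = 1
--     while p * b <= m: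
--         p *= b
--     return p
--
-- def f(n):
--     if n < 6:
--         return n
--     # breadth-first levels of reachable subproblems, then one bottom-up pass
--     levels = [{n}]
--     while True:
--         nxt = set()
--         for m in levels[-1]:
--             if m >= 6:
--                 nxt.add(m - _pow_below(m, 6))
--                 nxt.add(m - _pow_below(m, 9))
--         if not nxt:
--             break
--         levels.append(nxt)
--     dp = {}
--     for level in reversed(levels):
--         for m in level:
--             if m >= 6:
--                 x = m - _pow_below(m, 6)
--                 y = m - _pow_below(m, 9)
--                 dp[m] = min(1 + dp.get(x, x), 1 + dp.get(y, y))
--     return dp[n]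
-- ===== Notes on version B (the rewrite author's own statement) =====
-- stated objective: alternative
-- what changed: Replaces A's globally-memoized top-down recursion by an explicit breadth-first enumeration of the reachable subproblem values (levels of a frontier set) followed by one bottom-up table-filling pass over the levels in reverse, with the largest power found by multiplying up instead of A's divide-and-count-then-re-exponentiate loop.
import Mathlib
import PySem

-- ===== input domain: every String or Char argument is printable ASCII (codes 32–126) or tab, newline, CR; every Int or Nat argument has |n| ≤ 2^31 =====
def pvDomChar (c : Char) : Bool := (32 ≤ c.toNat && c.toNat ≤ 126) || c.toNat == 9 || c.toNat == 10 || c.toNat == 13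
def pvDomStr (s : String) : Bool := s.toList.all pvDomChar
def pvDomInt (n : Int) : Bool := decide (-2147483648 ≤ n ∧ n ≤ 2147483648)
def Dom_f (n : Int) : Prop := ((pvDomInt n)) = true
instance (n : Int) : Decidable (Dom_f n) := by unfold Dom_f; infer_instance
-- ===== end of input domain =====

-- B replaces A's globally-memoized top-down recursion by BFS levels of reachable subproblems plus one bottom-up table pass; equal return value proved on all admitted (nonnegative) inputs.

-- ===== PORT A =====
-- port of the two inline 'while a >= 6/9: i += 1; a //= b' loops of A; returns (i, a).
-- '2 ≤ b' is a termination guard only: both call sites pass the literal b = 6 or b = 9, where it always holds.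
def divLoop (b i a : Int) : Int × Int :=
  if b ≤ a ∧ 2 ≤ b then divLoop b (i + 1) (PySem.Int.floordiv a b) else (i, a)
termination_by a.toNat
decreasing_by
  rename_i h
  rw [PySem.Int.floordiv_eq_ediv_of_pos (by omega)]
  have h1 : a / b < a := by
    rw [Int.ediv_lt_iff_lt_mul (by omega : (0:Int) < b)]
    nlinarith [h.1, h.2]
  omega

-- port of 'memo = {i:i for i in range(6)}'
def memo0 : PySem.Dict Int Int :=
  (PySem.List.pyRange 0 6 1).foldl (fun d i => d.insert i i) PySem.Dict.empty

-- fuel-guarded port of A's memoized recursion (the fuel is a termination guard only; n.toNat + 1 is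
-- proved sufficient for every n ≥ 0, so the 0-fuel branch is unreachable there).  Returns (value, memo).
def fAux (fuel : Nat) (n : Int) (memo : PySem.Dict Int Int) : Int × PySem.Dict Int Int :=
  match fuel with
  | 0 => (0, memo)
  | fuel + 1 =>
    match memo.get? n with
    | some tmp => (tmp, memo)
    | none =>
      let i := (divLoop 6 0 n).1
      let j := (divLoop 9 0 n).1
      -- Python's 6**i with i ≥ 0 (i counts loop iterations, so i ≥ 0 here): 6 ^ i.toNat
      let r1 := fAux fuel (n - 6 ^ i.toNat) memo
      let r2 := fAux fuel (n - 9 ^ j.toNat) r1.2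
      let ret := min (1 + r1.1) (1 + r2.1)
      (ret, r2.2.insert n ret)

def f (n : Int) : Int := (fAux (n.toNat + 1) n memo0).1

-- ===== PORT B =====
-- port of _pow_below's 'p = 1; while p * b <= m: p *= b'.
-- 'p < p * b' is a termination guard only: at every reachable call 1 ≤ p and b ∈ {6, 9}, where it is implied.
def pbLoop (m b p : Int) : Int :=
  if p * b ≤ m ∧ p < p * b then pbLoop m b (p * b) else p
termination_by (m - p).toNat
decreasing_by rename_i h; omega

def powBelow (m b : Int) : Int := pbLoop m b 1

-- facts cited by the decreasing_by of buildLevels (and of the proof-side g below)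
theorem pbLoop_pos (m b : Int) (hb : 0 < b) (p : Int) : 0 < p → 0 < pbLoop m b p := by
  induction p using pbLoop.induct (m := m) (b := b) with
  | case1 x h ih => intro hp; rw [pbLoop, if_pos h]; exact ih (by positivity)
  | case2 x h => intro hp; rw [pbLoop, if_neg h]; exact hp

-- one BFS step of B: the set of children of the ≥6 members of the frontier
def childSet (fr : PySem.Set Int) : PySem.Set Int :=
  fr.foldl
    (fun s m =>
      if 6 ≤ m then
        PySem.Set.add (PySem.Set.add s (m - powBelow m 6)) (m - powBelow m 9)
      else s)
    PySem.Set.empty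

theorem mem_childSet_foldl {x : Int} : ∀ (fr s : List Int),
    (x ∈ fr.foldl
      (fun s m =>
        if 6 ≤ m then
          PySem.Set.add (PySem.Set.add s (m - powBelow m 6)) (m - powBelow m 9)
        else s) s) ↔
      x ∈ s ∨ ∃ m ∈ fr, 6 ≤ m ∧ (x = m - powBelow m 6 ∨ x = m - powBelow m 9) := by
  intro fr
  induction fr with
  | nil => simp
  | cons m t ih =>
      intro s
      simp only [List.foldl_cons, ih]
      split_ifs with hm
      · simp only [PySem.Set.mem_add]
        constructor
        · rintro (((h|h)|h) | ⟨m', hm', h6, hx⟩)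
          · exact Or.inl h
          · exact Or.inr ⟨m, by simp, hm, Or.inl h⟩
          · exact Or.inr ⟨m, by simp, hm, Or.inr h⟩
          · exact Or.inr ⟨m', by simp [hm'], h6, hx⟩
        · rintro (h | ⟨m', hm', h6, hx⟩)
          · exact Or.inl (Or.inl (Or.inl h))
          · rcases List.mem_cons.1 hm' with rfl | hm'
            · rcases hx with rfl | rfl
              · exact Or.inl (Or.inl (Or.inr rfl))
              · exact Or.inl (Or.inr rfl)
            · exact Or.inr ⟨m', hm', h6, hx⟩
      · constructor
        · rintro (h | ⟨m', hm', h6, hx⟩)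
          · exact Or.inl h
          · exact Or.inr ⟨m', by simp [hm'], h6, hx⟩
        · rintro (h | ⟨m', hm', h6, hx⟩)
          · exact Or.inl h
          · rcases List.mem_cons.1 hm' with rfl | hm'
            · omega
            · exact Or.inr ⟨m', hm', h6, hx⟩

theorem mem_childSet {fr : List Int} {x : Int} :
    x ∈ childSet fr ↔ ∃ m ∈ fr, 6 ≤ m ∧ (x = m - powBelow m 6 ∨ x = m - powBelow m 9) := by
  rw [childSet, mem_childSet_foldl]
  simp [PySem.Set.empty]

-- helper for the termination measure of buildLevels
def listMax (s : List Int) : Int := s.foldl max 0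

theorem le_listMax {s : List Int} {x : Int} (h : x ∈ s) : x ≤ listMax s :=
  (PySem.List.le_foldl_max s 0).2 x h

theorem foldl_max_le {c : Int} : ∀ (s : List Int) (a : Int), a ≤ c → (∀ x ∈ s, x ≤ c) → s.foldl max a ≤ c := by
  intro s
  induction s with
  | nil => intro a ha _; simpa using ha
  | cons y t ih =>
      intro a ha hall
      simp only [List.foldl_cons]
      exact ih _ (max_le ha (hall y (by simp))) (fun x hx => hall x (by simp [hx]))

theorem listMax_le {s : List Int} {c : Int} (hc : 0 ≤ c) (h : ∀ x ∈ s, x ≤ c) : listMax s ≤ c :=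
  foldl_max_le s 0 hc h

-- port of B's 'while True' loop building the list of levels (first level = fr)
def buildLevels (fr : PySem.Set Int) : List (PySem.Set Int) :=
  let nxt := childSet fr
  if h : nxt = [] then [fr] else fr :: buildLevels nxt
termination_by (listMax fr).toNat
decreasing_by
  obtain ⟨x, hx⟩ := List.exists_mem_of_ne_nil _ h
  obtain ⟨m, hm, hm6, -⟩ := mem_childSet.1 hx
  have hmax : 6 ≤ listMax fr := le_trans hm6 (le_listMax hm)
  have hbound : listMax (childSet fr) ≤ listMax fr - 1 := by
    apply listMax_le (by omega)
    intro y hy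
    obtain ⟨m', hm', -, hye⟩ := mem_childSet.1 hy
    have h1 : 0 < powBelow m' 6 := pbLoop_pos _ _ (by omega) _ (by omega)
    have h2 : 0 < powBelow m' 9 := pbLoop_pos _ _ (by omega) _ (by omega)
    have h3 : m' ≤ listMax fr := le_listMax hm'
    rcases hye with rfl | rfl <;> omega
  omega

-- one bottom-up level of B: 'for m in level: if m >= 6: dp[m] = min(1 + dp.get(x, x), 1 + dp.get(y, y))'
def procLevel (dp : PySem.Dict Int Int) (level : PySem.Set Int) : PySem.Dict Int Int :=
  level.foldl
    (fun dp m =>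
      if 6 ≤ m then
        dp.insert m (min (1 + dp.getD (m - powBelow m 6) (m - powBelow m 6))
                         (1 + dp.getD (m - powBelow m 9) (m - powBelow m 9)))
      else dp)
    dp

def f_alt (n : Int) : Int :=
  if n < 6 then n
  else
    let levels := buildLevels (PySem.Set.add PySem.Set.empty n)
    let dp := levels.reverse.foldl procLevel PySem.Dict.empty
    -- Python's dp[n]: the key n (≥ 6, in the first level) is always present, so the default is never read
    dp.getD n 0

-- ===== PRECONDITION & SPEC =====
-- Pre_f excludes exactly the negative inputs, on which Python A recurses without bound and raises RecursionError (B returns its argument there).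
def Pre_f (n : Int) : Prop := 0 ≤ n
instance (n : Int) : Decidable (Pre_f n) := by unfold Pre_f; infer_instance
def pvWitness_f : Int := 10

def Spec_f (n : Int) (out : Int) : Prop := out = f_alt n
instance (n : Int) (out : Int) : Decidable (Spec_f n out) := by unfold Spec_f; infer_instance

-- ===== CLAIM (what is proved, stated in full; the proofs are below) =====
def Claim_equal_f : Prop := ∀ (n : Int), Dom_f n → Pre_f n → Spec_f n (f n)

-- ===== LEMMAS AND PROOFS =====

theorem pbLoop_le (m b : Int) (p : Int) : p ≤ m → pbLoop m b p ≤ m := by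
  induction p using pbLoop.induct (m := m) (b := b) with
  | case1 x h ih => intro _; rw [pbLoop, if_pos h]; exact ih h.1
  | case2 x h => intro hp; rw [pbLoop, if_neg h]; exact hp


-- the mathematical recursion both ports compute
def g (n : Int) : Int :=
  if n < 6 then n
  else min (1 + g (n - powBelow n 6)) (1 + g (n - powBelow n 9))
termination_by n.toNat
decreasing_by
  · have h1 : 0 < powBelow n 6 := pbLoop_pos _ _ (by omega) _ (by omega)
    omega
  · have h1 : 0 < powBelow n 9 := pbLoop_pos _ _ (by omega) _ (by omega)
    omega

theorem g_of_lt {n : Int} (h : n < 6) : g n = n := by rw [g, if_pos h]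

theorem g_of_ge {n : Int} (h : ¬ n < 6) :
    g n = min (1 + g (n - powBelow n 6)) (1 + g (n - powBelow n 9)) := by
  rw [g, if_neg h]

-- ## A's divide-count loop computes the same largest power as B's multiply-up loop

theorem pbLoop_bounds (m b : Int) (hb : 2 ≤ b) (p : Int) :
    1 ≤ p → p ≤ m → pbLoop m b p ≤ m ∧ m < pbLoop m b p * b := by
  induction p using pbLoop.induct (m := m) (b := b) with
  | case1 x h ih => intro h1 _; rw [pbLoop, if_pos h]; exact ih (by nlinarith) h.1
  | case2 x h =>
      intro h1 h2; rw [pbLoop, if_neg h]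
      refine ⟨h2, ?_⟩
      rcases not_and_or.1 h with h' | h'
      · omega
      · exfalso; apply h'; nlinarith

theorem pbLoop_pow (m b : Int) (p : Int) :
    (∃ t : Nat, p = b ^ t) → ∃ k : Nat, pbLoop m b p = b ^ k := by
  induction p using pbLoop.induct (m := m) (b := b) with
  | case1 x h ih => rintro ⟨t, rfl⟩; rw [pbLoop, if_pos h]; exact ih ⟨t + 1, by ring⟩
  | case2 x h => rintro ⟨t, rfl⟩; rw [pbLoop, if_neg h]; exact ⟨t, rfl⟩

theorem divLoop_fst (b a i : Int) : (divLoop b i a).1 = i + (divLoop b 0 a).1 := by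
  by_cases h : b ≤ a ∧ 2 ≤ b
  · rw [divLoop, if_pos h]
    conv_rhs => rw [divLoop, if_pos h]
    rw [divLoop_fst b (PySem.Int.floordiv a b) (i + 1),
        divLoop_fst b (PySem.Int.floordiv a b) (0 + 1)]
    ring
  · rw [divLoop, if_neg h]
    conv_rhs => rw [divLoop, if_neg h]
    simp
termination_by a.toNat
decreasing_by
  all_goals
    rw [PySem.Int.floordiv_eq_ediv_of_pos (by omega)]
    have h1 : a / b < a := by
      rw [Int.ediv_lt_iff_lt_mul (by omega : (0:Int) < b)]
      nlinarith [h.1, h.2]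
    omega

theorem divLoop_bounds (b : Int) (hb : 2 ≤ b) (a : Int) (ha : 1 ≤ a) :
    0 ≤ (divLoop b 0 a).1 ∧
    b ^ ((divLoop b 0 a).1).toNat ≤ a ∧ a < b ^ (((divLoop b 0 a).1).toNat + 1) := by
  by_cases h : b ≤ a ∧ 2 ≤ b
  · have hb0 : (0:Int) < b := by omega
    have hq1 : 1 ≤ PySem.Int.floordiv a b := by
      rw [PySem.Int.floordiv_eq_ediv_of_pos hb0]
      rw [Int.le_ediv_iff_mul_le hb0]
      omega
    obtain ⟨ih0, ih1, ih2⟩ := divLoop_bounds b hb (PySem.Int.floordiv a b) hq1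
    rw [divLoop, if_pos h, divLoop_fst b (PySem.Int.floordiv a b) (0 + 1)]
    set c := (divLoop b 0 (PySem.Int.floordiv a b)).1 with hc
    have htn : (0 + 1 + c).toNat = c.toNat + 1 := by omega
    refine ⟨by omega, ?_, ?_⟩
    · rw [htn, pow_succ]
      have : b ^ c.toNat * b ≤ (PySem.Int.floordiv a b) * b := by nlinarith
      have hdm : (PySem.Int.floordiv a b) * b ≤ a := by
        rw [PySem.Int.floordiv_eq_ediv_of_pos hb0]
        exact Int.ediv_mul_le a (by omega)
      omega
    · rw [htn, pow_succ, pow_succ]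
      have hlt : a < (PySem.Int.floordiv a b + 1) * b := by
        rw [PySem.Int.floordiv_eq_ediv_of_pos hb0]
        exact Int.lt_ediv_add_one_mul_self a hb0
      rw [pow_succ] at ih2
      nlinarith
  · rw [divLoop, if_neg h]
    simp only []
    refine ⟨le_refl 0, ?_, ?_⟩ <;> simp <;> omega
termination_by a.toNat
decreasing_by
  rw [PySem.Int.floordiv_eq_ediv_of_pos (by omega)]
  have h1 : a / b < a := by
    rw [Int.ediv_lt_iff_lt_mul (by omega : (0:Int) < b)]
    nlinarith [h.1, h.2]
  omega

theorem pow_interval_unique {b : Int} (hb : 2 ≤ b) {a : Int} {e k : Nat}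
    (h1 : b ^ e ≤ a) (h2 : a < b ^ (e + 1)) (h3 : b ^ k ≤ a) (h4 : a < b ^ (k + 1)) : e = k := by
  have hb1 : (1:Int) < b := by omega
  by_contra hne
  rcases Nat.lt_or_ge e k with hlt | hge
  · have : b ^ (e + 1) ≤ b ^ k := pow_le_pow_right₀ (by omega) (by omega)
    omega
  · have : b ^ (k + 1) ≤ b ^ e := pow_le_pow_right₀ (by omega) (by omega)
    omega

theorem divLoop_pow_eq_powBelow (b : Int) (hb : 2 ≤ b) (n : Int) (hn : 1 ≤ n) :
    b ^ ((divLoop b 0 n).1).toNat = powBelow n b := by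
  obtain ⟨-, h1, h2⟩ := divLoop_bounds b hb n hn
  obtain ⟨k, hk⟩ := pbLoop_pow n b 1 ⟨0, by simp⟩
  have hbounds := pbLoop_bounds n b hb 1 le_rfl hn
  rw [powBelow, hk]
  rw [hk] at hbounds
  have := pow_interval_unique hb h1 h2 hbounds.1 (by rw [pow_succ]; exact hbounds.2)
  rw [this]

-- ## A's memoized recursion computes g

def GoodMemo (d : PySem.Dict Int Int) : Prop :=
  (∀ k v, d.get? k = some v → v = g k) ∧ (∀ k : Int, 0 ≤ k → k < 6 → d.get? k = some k)

theorem memo0_good : GoodMemo memo0 := by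
  have hm : memo0 = PySem.Dict.mk [(0,0),(1,1),(2,2),(3,3),(4,4),(5,5)] := by decide
  constructor
  · intro k v hkv
    rw [hm] at hkv
    simp only [PySem.Dict.get?_mk_cons] at hkv
    split_ifs at hkv with h0 h1 h2 h3 h4 h5
    all_goals simp only [beq_iff_eq, Option.some.injEq] at *
    all_goals try (rw [g_of_lt (by omega)]; omega)
    exact absurd hkv (by simp [show ({ items := [] } : PySem.Dict Int Int) = PySem.Dict.empty from rfl, PySem.Dict.get?_empty])
  · intro k h0 h6
    interval_cases k <;> decide

theorem fAux_correct : ∀ (fuel : Nat) (n : Int) (memo : PySem.Dict Int Int),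
    GoodMemo memo → 0 ≤ n → n.toNat < fuel →
    (fAux fuel n memo).1 = g n ∧ GoodMemo (fAux fuel n memo).2 := by
  intro fuel
  induction fuel with
  | zero => intro n memo _ _ h; omega
  | succ fuel ih =>
    intro n memo hg hn hf
    rw [fAux]
    cases hget : memo.get? n with
    | some tmp => exact ⟨hg.1 n tmp hget, hg⟩
    | none =>
      have hn6 : ¬ n < 6 := by
        intro hlt
        have := hg.2 n hn hlt
        rw [hget] at this; cases this
      have h6 : (6:Int) ^ ((divLoop 6 0 n).1).toNat = powBelow n 6 :=
        divLoop_pow_eq_powBelow 6 (by omega) n (by omega)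
      have h9 : (9:Int) ^ ((divLoop 9 0 n).1).toNat = powBelow n 9 :=
        divLoop_pow_eq_powBelow 9 (by omega) n (by omega)
      have hp6pos : 0 < powBelow n 6 := pbLoop_pos _ _ (by omega) _ (by omega)
      have hp6le : powBelow n 6 ≤ n := pbLoop_le _ _ _ (by omega)
      have hp9pos : 0 < powBelow n 9 := pbLoop_pos _ _ (by omega) _ (by omega)
      have hp9le : powBelow n 9 ≤ n := pbLoop_le _ _ _ (by omega)
      simp only [h6, h9]
      obtain ⟨ha1, hg1⟩ := ih (n - powBelow n 6) memo hg (by omega) (by omega)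
      obtain ⟨ha2, hg2⟩ :=
        ih (n - powBelow n 9) (fAux fuel (n - powBelow n 6) memo).2 hg1 (by omega) (by omega)
      refine ⟨by rw [ha1, ha2, g_of_ge hn6], ?_, ?_⟩
      · intro k v hkv
        rw [PySem.Dict.get?_insert] at hkv
        split_ifs at hkv with hk
        · subst hk
          simp only [Option.some.injEq] at hkv
          rw [← hkv, ha1, ha2, g_of_ge hn6]
        · exact hg2.1 k v hkv
      · intro k hk0 hk6
        rw [PySem.Dict.get?_insert, if_neg (by omega)]
        exact hg2.2 k hk0 hk6

-- ## B's BFS + bottom-up pass computes g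

def GoodDp (dp : PySem.Dict Int Int) : Prop := ∀ k v, dp.get? k = some v → v = g k

theorem getD_g {dp : PySem.Dict Int Int} (hg : GoodDp dp) {x : Int}
    (hx : x < 6 ∨ dp.contains x = true) : dp.getD x x = g x := by
  cases hget : dp.get? x with
  | none =>
      rw [PySem.Dict.getD_of_get?_eq_none _ _ hget]
      rcases hx with hx | hx
      · exact (g_of_lt hx).symm
      · rw [PySem.Dict.contains_eq_isSome_get?, hget] at hx; cases hx
  | some v => rw [PySem.Dict.getD_of_get?_eq_some _ _ hget]; exact hg x v hget

theorem procLevel_spec : ∀ (L : List Int) (dp : PySem.Dict Int Int), GoodDp dp →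
    (∀ m ∈ L, 6 ≤ m →
      (6 ≤ m - powBelow m 6 → dp.contains (m - powBelow m 6) = true) ∧
      (6 ≤ m - powBelow m 9 → dp.contains (m - powBelow m 9) = true)) →
    GoodDp (procLevel dp L) ∧
    (∀ k, dp.contains k = true → (procLevel dp L).contains k = true) ∧
    (∀ m ∈ L, 6 ≤ m → (procLevel dp L).contains m = true) := by
  intro L
  induction L with
  | nil => intro dp hg _; exact ⟨hg, fun k hk => hk, by simp⟩
  | cons m rest ih =>
      intro dp hg hav
      have hstep : procLevel dp (m :: rest) =
          procLevel (if 6 ≤ m then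
            dp.insert m (min (1 + dp.getD (m - powBelow m 6) (m - powBelow m 6))
                             (1 + dp.getD (m - powBelow m 9) (m - powBelow m 9)))
          else dp) rest := by
        simp only [procLevel, List.foldl_cons]
      by_cases h6 : 6 ≤ m
      · set dp1 := dp.insert m (min (1 + dp.getD (m - powBelow m 6) (m - powBelow m 6))
                                    (1 + dp.getD (m - powBelow m 9) (m - powBelow m 9))) with hdp1
        have hval : min (1 + dp.getD (m - powBelow m 6) (m - powBelow m 6))
                        (1 + dp.getD (m - powBelow m 9) (m - powBelow m 9)) = g m := by
          have hx := getD_g hg (x := m - powBelow m 6)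
            (by by_cases h : 6 ≤ m - powBelow m 6
                · exact Or.inr ((hav m (by simp) h6).1 h)
                · exact Or.inl (by omega))
          have hy := getD_g hg (x := m - powBelow m 9)
            (by by_cases h : 6 ≤ m - powBelow m 9
                · exact Or.inr ((hav m (by simp) h6).2 h)
                · exact Or.inl (by omega))
          rw [hx, hy, g_of_ge (n := m) (by omega)]
        have hg1 : GoodDp dp1 := by
          intro k v hkv
          rw [hdp1, PySem.Dict.get?_insert] at hkv
          split_ifs at hkv with hk
          · subst hk; simp only [Option.some.injEq] at hkv; rw [← hkv, hval]
          · exact hg k v hkv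
        have hmono1 : ∀ k, dp.contains k = true → dp1.contains k = true := by
          intro k hk
          rw [hdp1, PySem.Dict.contains_insert]
          simp [hk]
        have hav1 : ∀ m' ∈ rest, 6 ≤ m' →
            (6 ≤ m' - powBelow m' 6 → dp1.contains (m' - powBelow m' 6) = true) ∧
            (6 ≤ m' - powBelow m' 9 → dp1.contains (m' - powBelow m' 9) = true) := by
          intro m' hm' h6'
          obtain ⟨hA, hB⟩ := hav m' (by simp [hm']) h6'
          exact ⟨fun h => hmono1 _ (hA h), fun h => hmono1 _ (hB h)⟩
        obtain ⟨rg, rmono, rcont⟩ := ih dp1 hg1 hav1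
        rw [hstep, if_pos h6]
        refine ⟨rg, fun k hk => rmono k (hmono1 k hk), ?_⟩
        intro m' hm' h6'
        rcases List.mem_cons.1 hm' with rfl | hm'
        · exact rmono m' (by rw [hdp1, PySem.Dict.contains_insert]; simp)
        · exact rcont m' hm' h6'
      · have hav' : ∀ m' ∈ rest, 6 ≤ m' →
            (6 ≤ m' - powBelow m' 6 → dp.contains (m' - powBelow m' 6) = true) ∧
            (6 ≤ m' - powBelow m' 9 → dp.contains (m' - powBelow m' 9) = true) :=
          fun m' hm' h6' => hav m' (by simp [hm']) h6'
        obtain ⟨rg, rmono, rcont⟩ := ih dp hg hav'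
        rw [hstep, if_neg h6]
        refine ⟨rg, rmono, ?_⟩
        intro m' hm' h6'
        rcases List.mem_cons.1 hm' with rfl | hm'
        · exact absurd h6' h6
        · exact rcont m' hm' h6'

theorem buildLevels_correct : ∀ (fr : PySem.Set Int) (dp : PySem.Dict Int Int), GoodDp dp →
    GoodDp ((buildLevels fr).reverse.foldl procLevel dp) ∧
    (∀ k, dp.contains k = true → ((buildLevels fr).reverse.foldl procLevel dp).contains k = true) ∧
    (∀ m ∈ fr, 6 ≤ m → ((buildLevels fr).reverse.foldl procLevel dp).contains m = true) := by
  intro fr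
  induction fr using buildLevels.induct with
  | case1 fr nxt hnxt =>
      intro dp hg
      have hbl : buildLevels fr = [fr] := by rw [buildLevels]; exact dif_pos hnxt
      rw [hbl]
      simp only [List.reverse_singleton, List.foldl_cons, List.foldl_nil]
      have hno6 : ∀ m ∈ fr, ¬ 6 ≤ m := by
        intro m hm h6
        have : (m - powBelow m 6) ∈ childSet fr := mem_childSet.2 ⟨m, hm, h6, Or.inl rfl⟩
        rw [show childSet fr = [] from hnxt] at this; cases this
      have hav : ∀ m ∈ fr, 6 ≤ m →
          (6 ≤ m - powBelow m 6 → dp.contains (m - powBelow m 6) = true) ∧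
          (6 ≤ m - powBelow m 9 → dp.contains (m - powBelow m 9) = true) :=
        fun m hm h6 => absurd h6 (hno6 m hm)
      exact procLevel_spec fr dp hg hav
  | case2 fr nxt hnxt ih =>
      intro dp hg
      have hbl : buildLevels fr = fr :: buildLevels (childSet fr) := by
        rw [buildLevels]; exact dif_neg hnxt
      rw [hbl]
      simp only [List.reverse_cons, List.foldl_append, List.foldl_cons, List.foldl_nil]
      obtain ⟨ig, imono, icont⟩ := ih dp hg
      set inner := (buildLevels (childSet fr)).reverse.foldl procLevel dp with hinner
      have hav : ∀ m ∈ fr, 6 ≤ m →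
          (6 ≤ m - powBelow m 6 → inner.contains (m - powBelow m 6) = true) ∧
          (6 ≤ m - powBelow m 9 → inner.contains (m - powBelow m 9) = true) := by
        intro m hm h6
        constructor
        · intro hx
          exact icont _ (mem_childSet.2 ⟨m, hm, h6, Or.inl rfl⟩) hx
        · intro hy
          exact icont _ (mem_childSet.2 ⟨m, hm, h6, Or.inr rfl⟩) hy
      obtain ⟨rg, rmono, rcont⟩ := procLevel_spec fr inner ig hav
      exact ⟨rg, fun k hk => rmono k (imono k hk), rcont⟩

theorem f_alt_eq_g (n : Int) : f_alt n = g n := by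
  rw [f_alt]
  by_cases h6 : n < 6
  · rw [if_pos h6, g_of_lt h6]
  · rw [if_neg h6]
    have hfr : PySem.Set.add PySem.Set.empty n = [n] := by
      simp [PySem.Set.add, PySem.Set.empty, PySem.Set.contains]
    have hg0 : GoodDp PySem.Dict.empty := by
      intro k v hkv
      rw [PySem.Dict.get?_empty] at hkv; cases hkv
    obtain ⟨rg, -, rcont⟩ := buildLevels_correct (PySem.Set.add PySem.Set.empty n) PySem.Dict.empty hg0
    have hcont : ((buildLevels (PySem.Set.add PySem.Set.empty n)).reverse.foldl procLevel PySem.Dict.empty).contains n = true := by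
      apply rcont
      · rw [hfr]; simp
      · omega
    set dpf := (buildLevels (PySem.Set.add PySem.Set.empty n)).reverse.foldl procLevel PySem.Dict.empty with hdpf
    cases hget : dpf.get? n with
    | none => rw [PySem.Dict.contains_eq_isSome_get?, hget] at hcont; cases hcont
    | some v =>
        rw [PySem.Dict.getD_of_get?_eq_some _ _ hget]
        exact rg n v hget

-- ===== VERDICT (by name: the statement is the Claim_ definition above) =====
theorem f_spec : Claim_equal_f := by
  unfold Claim_equal_f
  intro n _ hp
  unfold Spec_f Pre_f at *
  rw [f_alt_eq_g n]
  exact (fAux_correct (n.toNat + 1) n memo0 memo0_good hp (by omega)).1
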